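-- pv_equiv track=rewrite | github.com/shtakasu/scaling_behavior_in_reservoir_computing | utils/ipc.py | gen_degs
-- ===== SOURCE A (Python) =====
-- def gen_degs(degsum,num):
--     if num==1:
--         return [[degsum]]
--     gen_list = []
--     for i in range(1,degsum-num+2):
--         list_ = gen_degs(degsum-i,num-1)
--         for j in range(len(list_)):
--             list_[j].append(i)
--         gen_list += list_
--     return gen_list
-- ===== SOURCE B (Python) =====
-- def gen_degs(degsum, num):
--     # No composition of degsum into num >= 2 positive parts exists when degsum < num.
--     if num > 1 and degsum < num:
--         return []
--     # Iterative layered build: states hold (suffix-so-far, remaining sum);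
--     # each layer chooses the next part from the back, prepending it.
--     states = [([], degsum)]
--     for k in reversed(range(1, num)):
--         states = [([i] + comp, rem - i)
--                   for comp, rem in states
--                   for i in range(1, rem - k + 1)]
--     return [[rem] + comp for comp, rem in states]
-- ===== Notes on version B (the rewrite author's own statement) =====
-- stated objective: alternative
-- what changed: Replaces A's recursion (recurse on num-1, then append the outer part to every sub-composition) by an iterative breadth-first layer build: a flat list of (suffix, remaining-sum) states is extended one part per layer by a comprehension, prepending each chosen part.
-- outside the precondition, e.g. on gen_degs(-3, 0): A returns [], B returns [[-3]]
import Mathlib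
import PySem

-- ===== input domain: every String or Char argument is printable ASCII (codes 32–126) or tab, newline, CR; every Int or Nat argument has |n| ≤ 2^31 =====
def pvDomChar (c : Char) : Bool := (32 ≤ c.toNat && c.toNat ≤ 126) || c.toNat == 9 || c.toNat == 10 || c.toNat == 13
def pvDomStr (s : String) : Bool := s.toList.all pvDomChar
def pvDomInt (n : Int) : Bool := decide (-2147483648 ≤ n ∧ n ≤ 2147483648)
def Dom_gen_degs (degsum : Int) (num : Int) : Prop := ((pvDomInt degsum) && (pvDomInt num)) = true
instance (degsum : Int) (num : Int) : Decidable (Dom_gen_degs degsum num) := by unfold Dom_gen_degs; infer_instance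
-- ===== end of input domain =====

-- B replaces A's recursion by an iterative layer-by-layer state build (alternative decomposition, same cost).

-- ===== PORT A =====
-- Literal port of A's recursion; the 'num ≤ 1 → []' guard only totalises the
-- cases (num ≤ 0) on which the Python recurses forever — they are outside Pre_.
def gen_degs (degsum : Int) (num : Int) : List (List Int) :=
  if num = 1 then [[degsum]]
  else if num ≤ 1 then []
  else
    (PySem.List.pyRange 1 (degsum - num + 2) 1).foldl
      (fun gen_list i =>
        gen_list ++ (gen_degs (degsum - i) (num - 1)).map (fun l => l ++ [i]))
      []
termination_by num.toNat
decreasing_by omega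

-- ===== PORT B =====
def gen_degs_alt (degsum : Int) (num : Int) : List (List Int) :=
  if 1 < num ∧ degsum < num then []
  else
  let states :=
    ((PySem.List.pyRange 1 num 1).reverse).foldl
      (fun states k =>
        states.flatMap (fun p =>
          (PySem.List.pyRange 1 (p.2 - k + 1) 1).map (fun i => (i :: p.1, p.2 - i))))
      [(([] : List Int), degsum)]
  states.map (fun p => p.2 :: p.1)

-- ===== PRECONDITION & SPEC =====
-- Pre_ restricts to the function's natural domain num ≥ 1: for num ≤ 0 the Python A
-- recurses forever on most inputs and returns [] on the rest (degsum ≤ num - 1) only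
-- as an artifact of the then-empty range, while B returns [[degsum]] there.
def Pre_gen_degs (degsum : Int) (num : Int) : Prop := 1 ≤ num
instance (degsum : Int) (num : Int) : Decidable (Pre_gen_degs degsum num) := by
  unfold Pre_gen_degs; infer_instance
def pvWitness_gen_degs : Int × Int := (5, 3)
def Spec_gen_degs (degsum : Int) (num : Int) (out : List (List Int)) : Prop := out = gen_degs_alt degsum num
instance (degsum : Int) (num : Int) (out : List (List Int)) : Decidable (Spec_gen_degs degsum num out) := by unfold Spec_gen_degs; infer_instance

-- ===== CLAIM (what is proved, stated in full; the proofs are below) =====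
def Claim_equal_gen_degs : Prop := ∀ (degsum : Int) (num : Int), Dom_gen_degs degsum num → Pre_gen_degs degsum num → Spec_gen_degs degsum num (gen_degs degsum num)

-- ===== LEMMAS AND PROOFS =====

-- Reference function: pvC d k = the compositions of d into k+1 positive parts, in A's order.
def pvC (d : Int) : Nat → List (List Int)
  | 0 => [[d]]
  | k + 1 =>
      (PySem.List.pyRange 1 (d - k) 1).flatMap
        (fun i => (pvC (d - i) k).map (fun l => l ++ [i]))

-- The per-layer comprehension of B, named so the fold invariant can be stated.
def pvStep (states : List (List Int × Int)) (k : Int) : List (List Int × Int) :=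
  states.flatMap (fun p =>
    (PySem.List.pyRange 1 (p.2 - k + 1) 1).map (fun i => (i :: p.1, p.2 - i)))

theorem pvA_eq_C (k : Nat) : ∀ (d : Int), gen_degs d ((k : Int) + 1) = pvC d k := by
  induction k with
  | zero => intro d; simp [gen_degs, pvC]
  | succ k ih =>
      intro d
      rw [gen_degs]
      simp only [Nat.cast_add, Nat.cast_one]
      rw [if_neg (by omega : ¬((k:Int)+1+1 = 1)), if_neg (by omega : ¬((k:Int)+1+1 ≤ 1)),
        PySem.List.foldl_append_eq_flatMap]
      have hr : d - ((k:Int)+1+1) + 2 = d - k := by ring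
      have hn : (k:Int)+1+1-1 = (k:Int)+1 := by ring
      rw [List.nil_append, hr]
      simp only [hn, ih]
      rw [pvC]

-- Fold invariant: running B's remaining layers [k, …, 1] from any states and then
-- finalising equals gluing each state's suffix onto every composition of its remainder.
theorem pvLayer (k : Nat) : ∀ (states : List (List Int × Int)),
    (((PySem.List.pyRange 1 ((k : Int) + 1) 1).reverse).foldl pvStep states).map
        (fun p => p.2 :: p.1)
      = states.flatMap (fun p => (pvC p.2 k).map (fun l => l ++ p.1)) := by
  induction k with
  | zero =>
      intro states
      rw [PySem.List.pyRange_one_eq_nil (by omega)]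
      simp only [List.reverse_nil, List.foldl_nil, pvC]
      induction states with
      | nil => rfl
      | cons a t iht => simpa using iht
  | succ k ih =>
      intro states
      simp only [Nat.cast_add, Nat.cast_one]
      rw [PySem.List.pyRange_one_succ_right (by omega : (1:Int) ≤ (k:Int)+1)]
      simp only [List.reverse_append, List.reverse_singleton, List.singleton_append,
        List.foldl_cons]
      rw [ih]
      unfold pvStep
      rw [List.flatMap_assoc]
      apply List.flatMap_congr ?_
      intro p _
      rw [List.flatMap_map]
      conv_rhs => rw [pvC]
      rw [List.map_flatMap]
      have hb : p.2 - ((k:Int)+1) + 1 = p.2 - k := by ring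
      rw [hb]
      apply List.flatMap_congr ?_
      intro i _
      simp [Function.comp, List.map_map, List.append_assoc]

theorem pvC_nil (m : Nat) (d : Int) (hd : d < (m : Int) + 2) : pvC d (m + 1) = [] := by
  rw [pvC, PySem.List.pyRange_one_eq_nil (by omega)]
  rfl

theorem pvB_eq_C (k : Nat) (d : Int) : gen_degs_alt d ((k : Int) + 1) = pvC d k := by
  unfold gen_degs_alt
  split_ifs with hc
  · obtain ⟨m, rfl⟩ : ∃ m : Nat, k = m + 1 := ⟨k - 1, by omega⟩
    exact (pvC_nil m d (by push_cast at hc ⊢; omega)).symm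
  rw [show (fun (states : List (List Int × Int)) (kk : Int) =>
        states.flatMap (fun p =>
          (PySem.List.pyRange 1 (p.2 - kk + 1) 1).map (fun i => (i :: p.1, p.2 - i)))) = pvStep
      from rfl]
  rw [pvLayer k [(([] : List Int), d)]]
  simp

-- ===== VERDICT (by name: the statement is the Claim_ definition above) =====
theorem gen_degs_spec : Claim_equal_gen_degs := by
  intro d n _ hpre
  unfold Spec_gen_degs
  obtain ⟨k, rfl⟩ : ∃ k : Nat, n = (k : Int) + 1 :=
    ⟨(n - 1).toNat, by unfold Pre_gen_degs at hpre; omega⟩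
  rw [pvA_eq_C, pvB_eq_C]
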